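-- pv_equiv track=rewrite | github.com/postforty/Javascript-Python-Coding-Test-Study | programers_Lv1/문자열 내림차순으로 배치하기.py | solution
-- ===== SOURCE A (Python) =====
-- import string
--
-- def solution(s):
--     alpha_lower = string.ascii_lowercase
--
--     first = []
--     second = []
--
--     for i in s:
--         if i in alpha_lower:
--             first.append(i)
--         else:
--             second.append(i)
--
--     return ''.join(sorted(first, reverse=True)) + ''.join(sorted(second, reverse=True))
-- ===== SOURCE B (Python) =====
-- import string
--
-- def solution(s):
--     # Counting sort over character codes: O(n + 128) instead of comparison sorting.
--     counts = {}
--     for ch in s: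
--         counts[ch] = counts.get(ch, 0) + 1
--     parts = []
--     for code in range(122, 96, -1):                  # 'z' down to 'a'
--         parts.append(chr(code) * counts.get(chr(code), 0))
--     for code in range(127, -1, -1):                  # all other ASCII codes, descending
--         if code < 97 or code > 122:
--             parts.append(chr(code) * counts.get(chr(code), 0))
--     return ''.join(parts)
-- ===== Notes on version B (the rewrite author's own statement) =====
-- stated objective: faster
-- what changed: Replaces the partition-then-comparison-sort (two sorted calls) with a single counting pass over a char-frequency dict followed by emitting each ASCII code's characters in descending code order.
import Mathlib
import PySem

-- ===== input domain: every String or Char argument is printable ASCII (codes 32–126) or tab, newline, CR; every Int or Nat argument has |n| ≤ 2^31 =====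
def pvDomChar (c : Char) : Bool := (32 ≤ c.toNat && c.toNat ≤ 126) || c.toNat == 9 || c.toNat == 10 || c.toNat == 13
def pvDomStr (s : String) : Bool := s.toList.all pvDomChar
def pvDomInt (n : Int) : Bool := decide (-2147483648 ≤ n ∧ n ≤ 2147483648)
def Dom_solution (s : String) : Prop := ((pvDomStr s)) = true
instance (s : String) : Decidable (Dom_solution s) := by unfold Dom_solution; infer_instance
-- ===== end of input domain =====

-- B replaces A's two comparison sorts by one counting pass plus an emit over descending ASCII codes.

-- ===== PORT A =====
def solution (s : String) : String :=
  let alphaLower : List Char := "abcdefghijklmnopqrstuvwxyz".toList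
  let fs := s.toList.foldl
    (fun (acc : List Char × List Char) i =>
      if i ∈ alphaLower then (acc.1 ++ [i], acc.2) else (acc.1, acc.2 ++ [i]))
    ([], [])
  String.ofList (PySem.List.sorted fs.1 (fun c => c.toNat) true
             ++ PySem.List.sorted fs.2 (fun c => c.toNat) true)

-- ===== PORT B =====
def solution_alt (s : String) : String :=
  let counts : PySem.Dict Char Int :=
    s.toList.foldl (fun d ch => d.insert ch (d.getD ch 0 + 1)) PySem.Dict.empty
  let parts1 : List (List Char) :=
    (PySem.List.pyRange 122 96 (-1)).foldl
      (fun parts code =>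
        parts ++ [PySem.List.pyRepeat [Char.ofNat code.toNat]
                    (counts.getD (Char.ofNat code.toNat) 0)]) []
  let parts2 : List (List Char) :=
    (PySem.List.pyRange 127 (-1) (-1)).foldl
      (fun parts code =>
        if code < 97 ∨ 122 < code then
          parts ++ [PySem.List.pyRepeat [Char.ofNat code.toNat]
                      (counts.getD (Char.ofNat code.toNat) 0)]
        else parts) []
  String.ofList (parts1 ++ parts2).flatten

-- ===== PRECONDITION & SPEC =====
def Spec_solution (s : String) (out : String) : Prop := out = solution_alt s
instance (s : String) (out : String) : Decidable (Spec_solution s out) := by unfold Spec_solution; infer_instance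

-- ===== CLAIM (what is proved, stated in full; the proofs are below) =====
def Claim_equal_solution : Prop := ∀ (s : String), Dom_solution s → Spec_solution s (solution s)

-- ===== LEMMAS AND PROOFS =====

-- the lowercase alphabet, and B's two descending code lists mapped to characters
def pvLowerList : List Char := "abcdefghijklmnopqrstuvwxyz".toList
def pvZtoA : List Char := (PySem.List.pyRange 122 96 (-1)).map (fun code => Char.ofNat code.toNat)
def pvOtherDesc : List Char :=
  ((PySem.List.pyRange 127 (-1) (-1)).filter
    (fun code => decide (code < 97 ∨ 122 < code))).map (fun code => Char.ofNat code.toNat)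

-- A's partition loop computes the two filters
lemma pvFoldl_partition (l : List Char) (a b : List Char) :
    l.foldl (fun (acc : List Char × List Char) i =>
        if i ∈ pvLowerList then (acc.1 ++ [i], acc.2) else (acc.1, acc.2 ++ [i])) (a, b)
      = (a ++ l.filter (fun i => decide (i ∈ pvLowerList)),
         b ++ l.filter (fun i => !decide (i ∈ pvLowerList))) := by
  induction l generalizing a b with
  | nil => simp
  | cons x t ih =>
    by_cases hx : x ∈ pvLowerList <;> simp [hx, ih]

-- counting occurrences in a flatMap of replicates over a Nodup code list
lemma pvCount_flatMap_replicate (cs : List Char) (cnt : Char → Nat) (a : Char)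
    (hnd : cs.Nodup) :
    (cs.flatMap (fun c => List.replicate (cnt c) c)).count a
      = if a ∈ cs then cnt a else 0 := by
  induction cs with
  | nil => simp
  | cons c t ih =>
    have hnd' : t.Nodup := hnd.of_cons
    by_cases hac : a = c
    · subst hac
      have : a ∉ t := (List.nodup_cons.mp hnd).1
      simp [List.count_append, ih hnd', this]
    · simp [List.count_append, List.count_replicate, ih hnd', Ne.symm hac, hac]

-- the characterisation of Python's descending sort as concatenated replicates
lemma pvSortedRev_eq_flatMap (cs l : List Char) (cnt : Char → Nat)
    (hdesc : cs.Pairwise (fun a b => b.toNat < a.toNat))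
    (hcnt : ∀ c ∈ cs, cnt c = l.count c)
    (hmem : ∀ x ∈ l, x ∈ cs) :
    PySem.List.sorted l (fun c => c.toNat) true
      = cs.flatMap (fun c => List.replicate (cnt c) c) := by
  have hnd : cs.Nodup := by
    refine hdesc.imp ?_
    intro a b hab heq; subst heq; exact (lt_irrefl _ hab)
  apply PySem.List.eq_of_perm_of_pairwise_le_of_injective (fun c : Char => -(c.toNat : Int))
  · intro a b h
    simp only [neg_inj, Nat.cast_inj] at h
    exact Char.ext (UInt32.toNat_inj.mp h)
  · refine (PySem.List.sorted_perm l _ true).trans ?_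
    rw [List.perm_iff_count]
    intro a
    rw [pvCount_flatMap_replicate cs cnt a hnd]
    by_cases ha : a ∈ cs
    · simp [ha, hcnt a ha]
    · have : a ∉ l := fun hal => ha (hmem a hal)
      simp [ha, List.count_eq_zero.mpr this]
  · exact (PySem.List.sorted_pairwise_rev l _).imp (by intro a b h; simpa using h)
  · rw [List.flatMap_def, List.pairwise_flatten]
    constructor
    · intro t ht
      rcases List.mem_map.mp ht with ⟨c, _, rfl⟩
      exact List.pairwise_replicate.mpr (Or.inr (le_refl _))
    · rw [List.pairwise_map]
      refine hdesc.imp ?_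
      intro a b hab x hx y hy
      rw [List.eq_of_mem_replicate hx, List.eq_of_mem_replicate hy]
      simp; omega

-- the count dict B builds reads back list counts
lemma pvCounts_getD (l : List Char) (c : Char) :
    (l.foldl (fun (d : PySem.Dict Char Int) ch => d.insert ch (d.getD ch 0 + 1))
        PySem.Dict.empty).getD c 0 = (l.count c : Int) := by
  have hstep : (fun (d : PySem.Dict Char Int) ch => d.insert ch (d.getD ch 0 + 1))
      = (fun d ch => d.modify ch 0 (fun v => v + 1)) := by
    funext d ch; exact (PySem.Dict.ext_iff.mpr rfl).symm
  rw [hstep, PySem.Dict.getD_foldl_modify_add_one]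
  simp [pysem]

-- decidable facts about the closed code lists
set_option maxRecDepth 4000 in
lemma pvZtoA_desc : pvZtoA.Pairwise (fun a b => b.toNat < a.toNat) := by decide
set_option maxRecDepth 4000 in
lemma pvOther_desc : pvOtherDesc.Pairwise (fun a b => b.toNat < a.toNat) := by decide
set_option maxRecDepth 4000 in
lemma pvZtoA_lower : ∀ c ∈ pvZtoA, c ∈ pvLowerList := by
  have h : pvZtoA.all (fun c => pvLowerList.contains c) = true := by decide
  intro c hc
  simpa using List.all_eq_true.mp h c hc
set_option maxRecDepth 4000 in
lemma pvLower_sub_ZtoA : ∀ c ∈ pvLowerList, c ∈ pvZtoA := by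
  have h : pvLowerList.all (fun c => pvZtoA.contains c) = true := by decide
  intro c hc
  simpa using List.all_eq_true.mp h c hc
set_option maxRecDepth 4000 in
lemma pvOther_not_lower : ∀ c ∈ pvOtherDesc, c ∉ pvLowerList := by
  have h : pvOtherDesc.all (fun c => !pvLowerList.contains c) = true := by decide
  intro c hc
  simpa using List.all_eq_true.mp h c hc
set_option maxRecDepth 4000 in
lemma pvMem_other : ∀ n ∈ List.range 128, Char.ofNat n ∉ pvLowerList → Char.ofNat n ∈ pvOtherDesc := by
  have h : (List.range 128).all
      (fun n => pvLowerList.contains (Char.ofNat n) || pvOtherDesc.contains (Char.ofNat n)) = true := by decide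
  intro n hn hnl
  have := List.all_eq_true.mp h n hn
  simp at this
  rcases this with h1 | h2
  · exact absurd h1 hnl
  · exact h2

-- B's guarded append loop is a filtered map
lemma pvFoldl_if_bool (f : Int → List Char) (l : List Int) (acc : List (List Char)) :
    l.foldl (fun parts code => if code < 97 ∨ 122 < code then parts ++ [f code] else parts) acc
      = acc ++ (l.filter (fun code => decide (code < 97 ∨ 122 < code))).map f := by
  have := PySem.List.foldl_append_if (fun code : Int => decide (code < 97 ∨ 122 < code)) f l acc
  simpa using this


-- ===== VERDICT (by name: the statement is the Claim_ definition above) =====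
theorem solution_spec : Claim_equal_solution := by
  intro s hdom
  unfold Dom_solution pvDomStr at hdom
  have hdomc : ∀ x ∈ s.toList, x.toNat < 128 := by
    intro x hx
    have := List.all_eq_true.mp hdom x hx
    simp [pvDomChar] at this; omega
  unfold Spec_solution solution solution_alt
  rw [show ("abcdefghijklmnopqrstuvwxyz".toList : List Char) = pvLowerList from rfl]
  simp only [pvFoldl_partition, pvFoldl_if_bool, PySem.List.foldl_append_singleton_eq_map,
    pvCounts_getD, PySem.List.pyRepeat_singleton, Int.toNat_natCast, List.nil_append]
  rw [List.flatten_append, ← List.flatMap_def, ← List.flatMap_def,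
      ← List.flatMap_map (fun code : Int => Char.ofNat code.toNat)
          (fun c => List.replicate (s.toList.count c) c),
      ← List.flatMap_map (fun code : Int => Char.ofNat code.toNat)
          (fun c => List.replicate (s.toList.count c) c)]
  rw [show ((PySem.List.pyRange 122 96 (-1)).map (fun code => Char.ofNat code.toNat)) = pvZtoA from rfl,
      show (((PySem.List.pyRange 127 (-1) (-1)).filter
        (fun code => decide (code < 97 ∨ 122 < code))).map (fun code => Char.ofNat code.toNat)) = pvOtherDesc from rfl]
  have h1 :
      PySem.List.sorted (s.toList.filter (fun i => decide (i ∈ pvLowerList))) (fun c => c.toNat) true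
        = pvZtoA.flatMap (fun c => List.replicate (s.toList.count c) c) := by
    apply pvSortedRev_eq_flatMap _ _ _ pvZtoA_desc
    · intro c hc
      exact (List.count_filter (by simpa using pvZtoA_lower c hc)).symm
    · intro x hx
      rw [List.mem_filter] at hx
      exact pvLower_sub_ZtoA x (by simpa using hx.2)
  have h2 :
      PySem.List.sorted (s.toList.filter (fun i => !decide (i ∈ pvLowerList))) (fun c => c.toNat) true
        = pvOtherDesc.flatMap (fun c => List.replicate (s.toList.count c) c) := by
    apply pvSortedRev_eq_flatMap _ _ _ pvOther_desc
    · intro c hc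
      exact (List.count_filter (by simpa using pvOther_not_lower c hc)).symm
    · intro x hx
      rw [List.mem_filter] at hx
      have hxr : x.toNat ∈ List.range 128 := List.mem_range.mpr (hdomc x hx.1)
      have hnl : Char.ofNat x.toNat ∉ pvLowerList := by
        rw [Char.ofNat_toNat]; simpa using hx.2
      have := pvMem_other x.toNat hxr hnl
      rwa [Char.ofNat_toNat] at this
  rw [h1, h2]
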